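-- pv_equiv track=rewrite | github.com/AIHSFL/MT_ | 1-General_workflow/3-evaluation-of-predictions.py | analyze_column_duplicates
-- ===== SOURCE A (Python) =====
-- from collections import Counter
--
-- def analyze_column_duplicates(series, name):
--     # Liste zu Tupel konvertieren fürs Zählen
--     tuples = [tuple(x) if isinstance(x, list) else x for x in series]
--     counter = Counter(tuples)
--
--     text=f"{name}\n"
--
--     if all(count == 1 for count in counter.values()):
--
--         text += f"Keine Wiederholende Werte \n"
--         text += f"\n{'-'*40}\n"
--
--         return text
--
--     num_unique = len(counter)
--     min_count = min(counter.values())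
--     max_count = max(counter.values())
--     min_values = [val for val, count in counter.items() if count == min_count]
--     max_values = [val for val, count in counter.items() if count == max_count]
--
--
--
--     text += f"Anzahl der Einzelwerte: {num_unique}\n"
--     text += f"Wert: {', '.join(map(str, min_values))} wiederholt sich {min_count}  Mal \n"
--     text += f"Wert: {', '.join(map(str, max_values))} wiederholt sich {max_count} Mal \n"
--     text += f"\n{'-'*40}\n"
--
--     return text
-- ===== SOURCE B (Python) =====
-- def analyze_column_duplicates(series, name):
--     # one pass: value -> count, then invert into count -> [values] buckets
--     counts = {}
--     for x in series:
--         counts[x] = counts.get(x, 0) + 1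
--     buckets = {}
--     for val, cnt in counts.items():
--         buckets.setdefault(cnt, []).append(val)
--
--     header = name + "\n"
--     footer = "\n" + "-" * 40 + "\n"
--
--     if set(buckets) <= {1}:
--         return header + "Keine Wiederholende Werte \n" + footer
--
--     min_count = min(buckets)
--     max_count = max(buckets)
--     body = ("Anzahl der Einzelwerte: %d\n" % len(counts)
--             + "Wert: %s wiederholt sich %d  Mal \n" % (", ".join(map(str, buckets[min_count])), min_count)
--             + "Wert: %s wiederholt sich %d Mal \n" % (", ".join(map(str, buckets[max_count])), max_count))
--     return header + body + footer
-- ===== Notes on version B (the rewrite author's own statement) =====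
-- stated objective: alternative
-- what changed: B inverts the value->count map into a count->values bucket dict in one pass, so min/max counts come from the bucket keys and min/max value lists are direct bucket lookups instead of two filtering comprehensions over counter.items(), and the all-unique test becomes 'every bucket key is 1'.
import Mathlib
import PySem

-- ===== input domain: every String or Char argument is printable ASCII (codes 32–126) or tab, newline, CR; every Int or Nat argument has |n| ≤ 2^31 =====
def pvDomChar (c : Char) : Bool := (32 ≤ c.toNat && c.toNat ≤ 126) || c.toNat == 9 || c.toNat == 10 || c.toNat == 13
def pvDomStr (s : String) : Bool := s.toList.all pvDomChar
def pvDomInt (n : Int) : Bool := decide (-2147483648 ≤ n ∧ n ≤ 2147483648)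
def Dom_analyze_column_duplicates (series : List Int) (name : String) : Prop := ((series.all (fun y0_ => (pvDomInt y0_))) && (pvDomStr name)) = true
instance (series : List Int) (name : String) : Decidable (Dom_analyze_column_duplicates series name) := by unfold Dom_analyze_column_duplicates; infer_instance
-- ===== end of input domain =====

-- B groups values into a count -> [values] bucket dict built in one pass over the counter,
-- so min/max counts come from the bucket keys and the value lists are direct bucket lookups
-- instead of A's two filtering comprehensions over counter.items() (objective: alternative).

-- '-' * 40 (shared string literal of both Pythons)
def pyDashes : String := String.ofList (List.replicate 40 '-')

-- ===== PORT A =====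
def analyze_column_duplicates (series : List Int) (name : String) : String :=
  -- tuples: isinstance(x, list) is False for every int, so the comprehension is the identity
  let tuples := series
  let counter := PySem.Dict.counter tuples
  let text := name ++ "\n"
  if counter.values.all (fun count => count == 1) then
    text ++ "Keine Wiederholende Werte \n" ++ ("\n" ++ pyDashes ++ "\n")
  else
    let num_unique : Int := (counter.size : Int)
    -- counter.values is nonempty in this branch (the all-test failed), so Python's min/max
    -- return normally; the .getD 0 default is never used
    let min_count := (PySem.List.min? counter.values (fun c => c)).getD 0
    let max_count := (PySem.List.max? counter.values (fun c => c)).getD 0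
    let min_values := (counter.items.filter (fun p => p.2 == min_count)).map (·.1)
    let max_values := (counter.items.filter (fun p => p.2 == max_count)).map (·.1)
    text ++ ("Anzahl der Einzelwerte: " ++ PySem.Int.toStr num_unique ++ "\n")
         ++ ("Wert: " ++ PySem.Str.join ", " (min_values.map PySem.Int.toStr) ++ " wiederholt sich " ++ PySem.Int.toStr min_count ++ "  Mal \n")
         ++ ("Wert: " ++ PySem.Str.join ", " (max_values.map PySem.Int.toStr) ++ " wiederholt sich " ++ PySem.Int.toStr max_count ++ " Mal \n")
         ++ ("\n" ++ pyDashes ++ "\n")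

-- ===== PORT B =====
def analyze_column_duplicates_alt (series : List Int) (name : String) : String :=
  -- counts[x] = counts.get(x, 0) + 1
  let counts := series.foldl (fun d x => d.modify x 0 (· + 1)) PySem.Dict.empty
  -- buckets.setdefault(cnt, []).append(val)
  let buckets := counts.items.foldl (fun d p => d.modify p.2 [] (· ++ [p.1])) PySem.Dict.empty
  let header := name ++ "\n"
  let footer := "\n" ++ pyDashes ++ "\n"
  if (PySem.Set.ofList buckets.keys).issubset (PySem.Set.ofList [1]) then
    header ++ "Keine Wiederholende Werte \n" ++ footer
  else
    -- min_count/max_count are bucket keys, so buckets[...] never raises; .getD [] is never the default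
    let min_count := (PySem.List.min? buckets.keys (fun c => c)).getD 0
    let max_count := (PySem.List.max? buckets.keys (fun c => c)).getD 0
    let body := ("Anzahl der Einzelwerte: " ++ PySem.Int.toStr (counts.size : Int) ++ "\n")
         ++ ("Wert: " ++ PySem.Str.join ", " ((buckets.getD min_count []).map PySem.Int.toStr) ++ " wiederholt sich " ++ PySem.Int.toStr min_count ++ "  Mal \n")
         ++ ("Wert: " ++ PySem.Str.join ", " ((buckets.getD max_count []).map PySem.Int.toStr) ++ " wiederholt sich " ++ PySem.Int.toStr max_count ++ " Mal \n")
    header ++ body ++ footer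

-- ===== PRECONDITION & SPEC =====
def Spec_analyze_column_duplicates (series : List Int) (name : String) (out : String) : Prop := out = analyze_column_duplicates_alt series name
instance (series : List Int) (name : String) (out : String) : Decidable (Spec_analyze_column_duplicates series name out) := by unfold Spec_analyze_column_duplicates; infer_instance

-- ===== CLAIM (what is proved, stated in full; the proofs are below) =====
def Claim_equal_analyze_column_duplicates : Prop := ∀ (series : List Int) (name : String), Dom_analyze_column_duplicates series name → Spec_analyze_column_duplicates series name (analyze_column_duplicates series name)

-- ===== LEMMAS AND PROOFS =====

-- keys of the bucket-building fold: exactly the old keys plus the counts that occur as p.2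
theorem mem_keys_bucket_foldl (l : List (Int × Int)) (d : PySem.Dict Int (List Int)) (c : Int) :
    c ∈ (l.foldl (fun d p => d.modify p.2 [] (· ++ [p.1])) d).keys ↔
      c ∈ d.keys ∨ c ∈ l.map (·.2) := by
  induction l generalizing d with
  | nil => simp
  | cons p l ih =>
    simp only [List.foldl_cons, ih, List.map_cons, List.mem_cons]
    rw [PySem.Dict.keys_modify]
    constructor
    · rintro (h | h)
      · rw [PySem.Dict.mem_keys_insert] at h
        tauto
      · tauto
    · rintro (h | h | h)
      · left; rw [PySem.Dict.mem_keys_insert]; tauto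
      · left; rw [PySem.Dict.mem_keys_insert]; tauto
      · tauto

-- the bucket of c is exactly A's filter-then-project comprehension over the items
theorem getD_bucket (l : List (Int × Int)) (c : Int) :
    (l.foldl (fun d p => d.modify p.2 [] (· ++ [p.1])) PySem.Dict.empty).getD c [] =
      (l.filter (fun p => p.2 == c)).map (·.1) := by
  have h : l.foldl (fun d p => d.modify p.2 [] (· ++ [p.1])) PySem.Dict.empty =
      (l.map (fun p => (p.2, p.1))).foldl (fun d q => d.modify q.1 [] (· ++ [q.2])) PySem.Dict.empty := by
    rw [List.foldl_map]
  rw [h, PySem.Dict.getD_foldl_modify_append]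
  simp [List.filter_map, Function.comp_def]

-- membership in the bucket keys is membership in counter.values
theorem mem_keys_bucket (C : PySem.Dict Int Int) (c : Int) :
    c ∈ (C.items.foldl (fun d p => d.modify p.2 [] (· ++ [p.1])) PySem.Dict.empty).keys ↔
      c ∈ C.values := by
  rw [mem_keys_bucket_foldl]
  simp [PySem.Dict.values, PySem.Dict.keys, PySem.Dict.empty]

-- first extremal elements agree when membership agrees (the min/max VALUE is unique)
theorem min?_id_eq_of_mem_iff (xs ys : List Int) (hne : xs ≠ [])
    (h : ∀ c, c ∈ xs ↔ c ∈ ys) :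
    PySem.List.min? xs (fun c => c) = PySem.List.min? ys (fun c => c) := by
  have hy : ys ≠ [] := by
    intro hy
    rcases List.exists_mem_of_ne_nil xs hne with ⟨x, hx⟩
    rw [h] at hx; simp [hy] at hx
  rcases Option.ne_none_iff_exists'.mp (fun hn => hne ((PySem.List.min?_eq_none_iff xs (fun c : Int => c)).mp hn)) with ⟨m₁, hm₁⟩
  rcases Option.ne_none_iff_exists'.mp (fun hn => hy ((PySem.List.min?_eq_none_iff ys (fun c : Int => c)).mp hn)) with ⟨m₂, hm₂⟩
  rw [hm₁, hm₂]
  have h1 := PySem.List.min?_isMin hm₁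
  have h2 := PySem.List.min?_isMin hm₂
  have e1 : m₁ ∈ ys := (h m₁).mp (PySem.List.min?_mem hm₁)
  have e2 : m₂ ∈ xs := (h m₂).mpr (PySem.List.min?_mem hm₂)
  exact congrArg some (le_antisymm (h1 m₂ e2) (h2 m₁ e1))

theorem max?_id_eq_of_mem_iff (xs ys : List Int) (hne : xs ≠ [])
    (h : ∀ c, c ∈ xs ↔ c ∈ ys) :
    PySem.List.max? xs (fun c => c) = PySem.List.max? ys (fun c => c) := by
  have hy : ys ≠ [] := by
    intro hy
    rcases List.exists_mem_of_ne_nil xs hne with ⟨x, hx⟩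
    rw [h] at hx; simp [hy] at hx
  rcases Option.ne_none_iff_exists'.mp (fun hn => hne ((PySem.List.max?_eq_none_iff xs (fun c : Int => c)).mp hn)) with ⟨m₁, hm₁⟩
  rcases Option.ne_none_iff_exists'.mp (fun hn => hy ((PySem.List.max?_eq_none_iff ys (fun c : Int => c)).mp hn)) with ⟨m₂, hm₂⟩
  rw [hm₁, hm₂]
  have h1 := PySem.List.max?_isMax hm₁
  have h2 := PySem.List.max?_isMax hm₂
  have e1 : m₁ ∈ ys := (h m₁).mp (PySem.List.max?_mem hm₁)
  have e2 : m₂ ∈ xs := (h m₂).mpr (PySem.List.max?_mem hm₂)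
  exact congrArg some (le_antisymm (h2 m₁ e1) (h1 m₂ e2))

-- ===== VERDICT (by name: the statement is the Claim_ definition above) =====
theorem analyze_column_duplicates_spec : Claim_equal_analyze_column_duplicates := by
  intro series name _
  unfold Spec_analyze_column_duplicates
  simp only [analyze_column_duplicates, analyze_column_duplicates_alt]
  rw [← PySem.Dict.counter_eq_foldl]
  set C := PySem.Dict.counter series with hC
  set Bk := C.items.foldl (fun d p => d.modify p.2 [] (· ++ [p.1])) PySem.Dict.empty with hBk
  have hmem : ∀ c, c ∈ Bk.keys ↔ c ∈ C.values := fun c => mem_keys_bucket C c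
  have hcond : ((PySem.Set.ofList Bk.keys).issubset (PySem.Set.ofList [1]) : Bool)
      = C.values.all (fun count => count == 1) := by
    by_cases h : ∀ v ∈ C.values, v = 1
    · have h1 : (PySem.Set.ofList Bk.keys).issubset (PySem.Set.ofList [1]) = true := by
        rw [PySem.Set.issubset_iff]
        intro x hx
        rw [PySem.Set.mem_ofList] at hx ⊢
        simp [h x ((hmem x).mp hx)]
      have h2 : C.values.all (fun count => count == 1) = true := by
        simp only [List.all_eq_true]
        intro v hv; simpa using h v hv
      rw [h1, h2]
    · rcases not_forall.mp h with ⟨v, hv2⟩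
      rcases Classical.not_imp.mp hv2 with ⟨hv, hv1⟩
      have h1 : (PySem.Set.ofList Bk.keys).issubset (PySem.Set.ofList [1]) = false := by
        rw [Bool.eq_false_iff]
        intro hc
        rw [PySem.Set.issubset_iff] at hc
        have := hc v (by rw [PySem.Set.mem_ofList]; exact (hmem v).mpr hv)
        rw [PySem.Set.mem_ofList] at this
        exact hv1 (by simpa using this)
      have h2 : C.values.all (fun count => count == 1) = false := by
        rw [Bool.eq_false_iff]
        intro hc
        rw [List.all_eq_true] at hc
        exact hv1 (by simpa using hc v hv)
      rw [h1, h2]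
  rw [hcond]
  by_cases hall : C.values.all (fun count => count == 1) = true
  · rw [if_pos hall, if_pos hall]
  · rw [if_neg hall, if_neg hall]
    have hvne : C.values ≠ [] := by
      intro hnil
      exact hall (by simp [hnil])
    have hmin : PySem.List.min? Bk.keys (fun c => c) = PySem.List.min? C.values (fun c => c) :=
      min?_id_eq_of_mem_iff _ _ (by
        intro hk
        rcases List.exists_mem_of_ne_nil _ hvne with ⟨v, hv⟩
        have := (hmem v).mpr hv
        simp [hk] at this) hmem
    have hmax : PySem.List.max? Bk.keys (fun c => c) = PySem.List.max? C.values (fun c => c) :=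
      max?_id_eq_of_mem_iff _ _ (by
        intro hk
        rcases List.exists_mem_of_ne_nil _ hvne with ⟨v, hv⟩
        have := (hmem v).mpr hv
        simp [hk] at this) hmem
    rw [hmin, hmax, hBk, getD_bucket, getD_bucket]
    simp [String.append_assoc]
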